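-- pv_equiv track=rewrite | github.com/6210qwe/leetcode_py | leetcode_solutions/by_id/q2550.py | solution_function_name
-- ===== SOURCE A (Python) =====
-- from typing import List
--
-- def solution_function_name(queries: List[str], dictionary: List[str]) -> List[str]:
--     """
--     函数式接口 - 实现
--     """
--     def edit_distance(word1: str, word2: str) -> int:
--         """计算两个单词之间的编辑距离（仅考虑替换操作）"""
--         return sum(c1 != c2 for c1, c2 in zip(word1, word2))
--
--     res = []
--     for query in queries:
--         for word in dictionary:
--             if edit_distance(query, word) <= 2:
--                 res.append(query)
--                 break
--     return res
-- ===== SOURCE B (Python) =====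
-- from typing import List
--
-- def solution_function_name(queries: List[str], dictionary: List[str]) -> List[str]:
--     """Sweep the dictionary once over a boolean matched-mask for all queries
--     (stopping as soon as every query is matched), then filter the queries by
--     the mask."""
--     matched = [False] * len(queries)
--     for word in dictionary:
--         if all(matched):
--             break
--         for i, query in enumerate(queries):
--             if not matched[i] and sum(a != b for a, b in zip(query, word)) <= 2:
--                 matched[i] = True
--     return [q for q, ok in zip(queries, matched) if ok]
-- ===== Notes on version B (the rewrite author's own statement) =====
-- stated objective: alternative
-- what changed: B inverts the traversal: one sweep over the dictionary updates a boolean matched-mask covering all queries at once (skipping already-matched queries), and the result is the queries filtered by the mask, instead of A's per-query dictionary scan with break.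
import Mathlib
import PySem

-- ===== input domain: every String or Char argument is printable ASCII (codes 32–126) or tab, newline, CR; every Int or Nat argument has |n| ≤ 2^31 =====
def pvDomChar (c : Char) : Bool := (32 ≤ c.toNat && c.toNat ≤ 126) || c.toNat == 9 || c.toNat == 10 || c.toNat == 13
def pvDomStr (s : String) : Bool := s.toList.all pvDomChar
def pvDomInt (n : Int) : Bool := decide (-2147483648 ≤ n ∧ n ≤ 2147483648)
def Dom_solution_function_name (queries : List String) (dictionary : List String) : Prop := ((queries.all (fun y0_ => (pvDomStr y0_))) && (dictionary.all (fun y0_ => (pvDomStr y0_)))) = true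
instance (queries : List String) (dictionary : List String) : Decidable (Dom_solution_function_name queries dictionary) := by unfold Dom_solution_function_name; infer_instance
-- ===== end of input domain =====

-- B inverts the traversal: one sweep over the dictionary updates a boolean matched-mask
-- over all queries, then the queries are filtered by the mask (alternative decomposition).


-- ===== PORT A =====

-- edit_distance: sum(c1 != c2 for c1, c2 in zip(word1, word2))
def pvEditDistance (word1 word2 : String) : Nat :=
  ((word1.toList.zip word2.toList).map (fun p => if p.1 ≠ p.2 then 1 else 0)).sum

-- the inner 'for word in dictionary: if … : res.append(query); break'
def pvAInner (query : String) (ws : List String) (res : List String) : List String :=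
  match ws with
  | [] => res
  | w :: rest => if pvEditDistance query w ≤ 2 then res ++ [query] else pvAInner query rest res

def solution_function_name (queries : List String) (dictionary : List String) : List String :=
  queries.foldl (fun res query => pvAInner query dictionary res) []

-- ===== PORT B =====

-- sum(a != b for a, b in zip(query, word)): the count of mismatching aligned positions
def pvMismatches (query word : String) : Nat :=
  (query.toList.zip word.toList).countP (fun p => p.1 != p.2)

-- one dictionary word's sweep over the matched-mask ('for i, query in enumerate(queries): …')
def pvSweep (queries : List String) (matched : List Bool) (word : String) : List Bool :=
  (queries.zip matched).map (fun p =>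
    if !p.2 && decide (pvMismatches p.1 word ≤ 2) then true else p.2)

-- the word loop with its 'if all(matched): break'
def pvBLoop (queries : List String) (ws : List String) (matched : List Bool) : List Bool :=
  match ws with
  | [] => matched
  | w :: rest =>
    if matched.all (fun m => m) then matched
    else pvBLoop queries rest (pvSweep queries matched w)

def solution_function_name_alt (queries : List String) (dictionary : List String) : List String :=
  let matched := pvBLoop queries dictionary (List.replicate queries.length false)
  ((queries.zip matched).filter (fun p => p.2)).map (fun p => p.1)

-- ===== PRECONDITION & SPEC =====
def Spec_solution_function_name (queries : List String) (dictionary : List String) (out : List String) : Prop := out = solution_function_name_alt queries dictionary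
instance (queries : List String) (dictionary : List String) (out : List String) : Decidable (Spec_solution_function_name queries dictionary out) := by unfold Spec_solution_function_name; infer_instance

-- ===== CLAIM (what is proved, stated in full; the proofs are below) =====
def Claim_equal_solution_function_name : Prop := ∀ (queries : List String) (dictionary : List String), Dom_solution_function_name queries dictionary → Spec_solution_function_name queries dictionary (solution_function_name queries dictionary)

-- ===== LEMMAS AND PROOFS =====

-- A's inner loop is a search
theorem pvAInner_eq (q : String) (ws : List String) (res : List String) :
    pvAInner q ws res = if ws.any (fun w => pvEditDistance q w ≤ 2) then res ++ [q] else res := by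
  induction ws with
  | nil => simp [pvAInner]
  | cons w rest ih => by_cases h : pvEditDistance q w ≤ 2 <;> simp [pvAInner, h, ih]

-- A is a filter
theorem pvA_eq_filter (queries dictionary : List String) :
    solution_function_name queries dictionary
      = queries.filter (fun q => dictionary.any (fun w => pvEditDistance q w ≤ 2)) := by
  unfold solution_function_name
  have key : ∀ (qs : List String) (acc : List String),
      qs.foldl (fun res query => pvAInner query dictionary res) acc
        = acc ++ qs.filter (fun q => dictionary.any (fun w => pvEditDistance q w ≤ 2)) := by
    intro qs
    induction qs with
    | nil => simp
    | cons q t ih =>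
      intro acc
      rw [List.foldl_cons, ih, pvAInner_eq]
      by_cases h : dictionary.any (fun w => pvEditDistance q w ≤ 2) <;> simp [h]
  simpa using key queries []

-- the two mismatch counts agree
theorem pvDist_eq (q w : String) : pvEditDistance q w = pvMismatches q w := by
  unfold pvEditDistance pvMismatches
  induction q.toList.zip w.toList with
  | nil => simp
  | cons p t ih =>
    rw [List.map_cons, List.sum_cons, List.countP_cons, ← ih]
    by_cases h : p.1 = p.2 <;> simp [h]
    omega

-- zipping a list with a pointwise function of itself
theorem pvZipMap {α β : Type} (l : List α) (g : α → β) :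
    l.zip (l.map g) = l.map (fun a => (a, g a)) := by
  induction l with
  | nil => simp
  | cons a t ih => simp [ih]

-- the word loop computes, per query, 'matched by some word'
theorem pvFold_eq (queries : List String) (ws : List String) (g : String → Bool) :
    pvBLoop queries ws (queries.map g)
      = queries.map (fun q => g q || ws.any (fun w => pvMismatches q w ≤ 2)) := by
  induction ws generalizing g with
  | nil => simp [pvBLoop]
  | cons w t ih =>
    unfold pvBLoop
    by_cases hall : (queries.map g).all (fun m => m)
    · rw [if_pos hall]
      refine List.map_congr_left (fun q hq => ?_)
      have : g q = true := by
        have := List.all_eq_true.mp hall (g q) (List.mem_map_of_mem hq)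
        simpa using this
      simp [this]
    · rw [if_neg hall]
      have hstep : pvSweep queries (queries.map g) w
          = queries.map (fun q => g q || decide (pvMismatches q w ≤ 2)) := by
        unfold pvSweep
        rw [pvZipMap, List.map_map]
        refine List.map_congr_left (fun q _ => ?_)
        cases hg : g q <;> cases hd : decide (pvMismatches q w ≤ 2) <;> simp [hg, hd]
      rw [hstep, ih]
      refine List.map_congr_left (fun q _ => ?_)
      cases g q <;> simp

-- filtering through the mask is filtering the queries
theorem pvMaskFilter (queries : List String) (g : String → Bool) :
    ((queries.zip (queries.map g)).filter (fun p => p.2)).map (fun p => p.1)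
      = queries.filter g := by
  rw [pvZipMap, List.filter_map, List.map_map]
  simp [Function.comp_def]

-- B is the same filter
theorem pvB_eq_filter (queries dictionary : List String) :
    solution_function_name_alt queries dictionary
      = queries.filter (fun q => dictionary.any (fun w => pvMismatches q w ≤ 2)) := by
  unfold solution_function_name_alt
  rw [show List.replicate queries.length false = queries.map (fun _ => false) by
        rw [List.map_const']]
  rw [pvFold_eq, pvMaskFilter]
  simp

-- ===== VERDICT (by name: the statement is the Claim_ definition above) =====
theorem solution_function_name_spec : Claim_equal_solution_function_name := by
  intro queries dictionary _
  unfold Spec_solution_function_name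
  rw [pvA_eq_filter, pvB_eq_filter]
  exact List.filter_congr (fun q _ => by simp only [pvDist_eq])
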